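-- pv_equiv track=rewrite | github.com/ianjamesburke/kill-tony-archive | backend/transcript_fetcher.py | _ordered_caption_tracks
-- ===== SOURCE A (Python) =====
-- from typing import Any, Iterable
--
-- def _ordered_caption_tracks(tracks: Iterable[dict[str, Any]]) -> list[dict[str, Any]]:
--     # Prefer JSON3 first: it includes timing + cleaner segmented text.
--     preferred_exts = ("json3", "vtt", "ttml", "srv3", "srv2", "srv1", "json")
--     remaining = list(tracks)
--     ordered: list[dict[str, Any]] = []
--     for ext in preferred_exts:
--         matching = [t for t in remaining if t.get("ext") == ext]
--         ordered.extend(matching)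
--         remaining = [t for t in remaining if t.get("ext") != ext]
--     ordered.extend(remaining)
--     return ordered
-- ===== SOURCE B (Python) =====
-- def _ordered_caption_tracks(tracks):
--     # One stable sort keyed by extension priority instead of repeated scan-and-filter passes.
--     preferred_exts = ("json3", "vtt", "ttml", "srv3", "srv2", "srv1", "json")
--     priority = {ext: i for i, ext in enumerate(preferred_exts)}
--     fallback = len(preferred_exts)
--     return sorted(tracks, key=lambda t: priority.get(t.get("ext"), fallback))
-- ===== Notes on version B (the rewrite author's own statement) =====
-- stated objective: idiomatic
-- what changed: Replaced seven scan-and-filter passes over shrinking copies of the track list with a single stable sort keyed by a priority dict built once from the preferred extensions.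
import Mathlib
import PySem

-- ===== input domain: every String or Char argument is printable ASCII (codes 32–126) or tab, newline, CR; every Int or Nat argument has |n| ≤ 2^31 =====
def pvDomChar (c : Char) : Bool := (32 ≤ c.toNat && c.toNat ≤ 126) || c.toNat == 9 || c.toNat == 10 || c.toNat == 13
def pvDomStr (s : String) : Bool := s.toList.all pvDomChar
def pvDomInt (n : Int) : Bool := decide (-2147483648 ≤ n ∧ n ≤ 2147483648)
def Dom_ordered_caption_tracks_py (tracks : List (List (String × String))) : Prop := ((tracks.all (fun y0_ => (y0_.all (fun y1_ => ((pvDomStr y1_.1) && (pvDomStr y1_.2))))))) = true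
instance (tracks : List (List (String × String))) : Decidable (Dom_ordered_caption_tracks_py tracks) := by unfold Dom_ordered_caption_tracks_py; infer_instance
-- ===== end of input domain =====

-- B replaces A's seven scan-and-filter passes with one stable sort keyed by a priority dict (idiomatic; same cost).

-- ===== PORT A =====
-- loop body of A: append matching tracks, keep the rest for later passes
def pvStep (st : List (List (String × String)) × List (List (String × String))) (ext : String) :
    List (List (String × String)) × List (List (String × String)) :=
  (st.1 ++ st.2.filter (fun t => (PySem.Dict.mk t).get? "ext" == some ext),
   st.2.filter (fun t => !((PySem.Dict.mk t).get? "ext" == some ext)))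

def pvPreferredExts : List String := ["json3", "vtt", "ttml", "srv3", "srv2", "srv1", "json"]

def ordered_caption_tracks_py (tracks : List (List (String × String))) : List (List (String × String)) :=
  let st := pvPreferredExts.foldl pvStep ([], tracks)
  st.1 ++ st.2

-- ===== PORT B =====
-- priority = {ext: i for i, ext in enumerate(preferred_exts)}
def pvPriority : PySem.Dict (Option String) Int :=
  PySem.Dict.mk [(some "json3", 0), (some "vtt", 1), (some "ttml", 2), (some "srv3", 3),
                 (some "srv2", 4), (some "srv1", 5), (some "json", 6)]

-- key=lambda t: priority.get(t.get("ext"), fallback)  with fallback = len(preferred_exts) = 7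
def pvKeyB (t : List (String × String)) : Int :=
  pvPriority.getD ((PySem.Dict.mk t).get? "ext") 7

-- single stable sort by the priority key
def ordered_caption_tracks_py_alt (tracks : List (List (String × String))) : List (List (String × String)) :=
  PySem.List.sorted tracks pvKeyB

-- ===== PRECONDITION & SPEC =====
def Spec_ordered_caption_tracks_py (tracks : List (List (String × String))) (out : List (List (String × String))) : Prop := out = ordered_caption_tracks_py_alt tracks
instance (tracks : List (List (String × String))) (out : List (List (String × String))) : Decidable (Spec_ordered_caption_tracks_py tracks out) := by unfold Spec_ordered_caption_tracks_py; infer_instance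

-- ===== CLAIM (what is proved, stated in full; the proofs are below) =====
def Claim_equal_ordered_caption_tracks_py : Prop := ∀ (tracks : List (List (String × String))), Dom_ordered_caption_tracks_py tracks → Spec_ordered_caption_tracks_py tracks (ordered_caption_tracks_py tracks)

-- ===== LEMMAS AND PROOFS =====

-- bucket of tracks whose key is v, and the canonical bucketed arrangement
def pvBkt (v : Int) (xs : List (List (String × String))) : List (List (String × String)) :=
  xs.filter (fun t => pvKeyB t == v)

def pvC (xs : List (List (String × String))) : List (List (String × String)) :=
  pvBkt 0 xs ++ (pvBkt 1 xs ++ (pvBkt 2 xs ++ (pvBkt 3 xs ++ (pvBkt 4 xs ++ (pvBkt 5 xs ++ (pvBkt 6 xs ++ pvBkt 7 xs))))))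

lemma pvKeyB_some (t : List (String × String)) (e : String) (h : (PySem.Dict.mk t).get? "ext" = some e) :
    pvKeyB t = if e = "json3" then 0 else if e = "vtt" then 1 else if e = "ttml" then 2
      else if e = "srv3" then 3 else if e = "srv2" then 4 else if e = "srv1" then 5
      else if e = "json" then 6 else 7 := by
  have hk : pvKeyB t = pvPriority.getD (some e) 7 := by rw [pvKeyB, h]
  rw [hk]
  simp only [pvPriority, PySem.Dict.getD, PySem.Dict.get?, List.find?]
  by_cases h1 : e = "json3"; · subst h1; rfl
  by_cases h2 : e = "vtt"; · subst h2; rfl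
  by_cases h3 : e = "ttml"; · subst h3; rfl
  by_cases h4 : e = "srv3"; · subst h4; rfl
  by_cases h5 : e = "srv2"; · subst h5; rfl
  by_cases h6 : e = "srv1"; · subst h6; rfl
  by_cases h7 : e = "json"; · subst h7; rfl
  have g1 : ("json3" == e) = false := beq_eq_false_iff_ne.mpr (Ne.symm h1)
  have g2 : ("vtt" == e) = false := beq_eq_false_iff_ne.mpr (Ne.symm h2)
  have g3 : ("ttml" == e) = false := beq_eq_false_iff_ne.mpr (Ne.symm h3)
  have g4 : ("srv3" == e) = false := beq_eq_false_iff_ne.mpr (Ne.symm h4)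
  have g5 : ("srv2" == e) = false := beq_eq_false_iff_ne.mpr (Ne.symm h5)
  have g6 : ("srv1" == e) = false := beq_eq_false_iff_ne.mpr (Ne.symm h6)
  have g7 : ("json" == e) = false := beq_eq_false_iff_ne.mpr (Ne.symm h7)
  simp [g1, g2, g3, g4, g5, g6, g7, h1, h2, h3, h4, h5, h6, h7]

lemma pvKeyB_cases (t : List (String × String)) :
    pvKeyB t = 0 ∨ pvKeyB t = 1 ∨ pvKeyB t = 2 ∨ pvKeyB t = 3 ∨ pvKeyB t = 4 ∨
    pvKeyB t = 5 ∨ pvKeyB t = 6 ∨ pvKeyB t = 7 := by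
  rcases h : (PySem.Dict.mk t).get? "ext" with _ | e
  · have : pvKeyB t = 7 := by rw [pvKeyB, h]; rfl
    simp [this]
  · rw [pvKeyB_some t e h]
    split_ifs <;> simp

lemma mem_pvBkt {v : Int} {xs : List (List (String × String))} {y : List (String × String)}
    (h : y ∈ pvBkt v xs) : pvKeyB y = v := by
  simp [pvBkt, List.mem_filter] at h
  exact h.2

lemma insertBy_skip {α : Type} (before : α → α → Bool) (x : α) (l1 l2 : List α)
    (h : ∀ y ∈ l1, before x y = false) :
    PySem.List.insertBy before x (l1 ++ l2) = l1 ++ PySem.List.insertBy before x l2 := by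
  induction l1 with
  | nil => rfl
  | cons a l ih =>
    simp only [List.cons_append, PySem.List.insertBy, h a (by simp)]
    simp only [Bool.false_eq_true, if_false, List.cons.injEq, true_and]
    exact ih (fun y hy => h y (by simp [hy]))

lemma insertBy_all {α : Type} (before : α → α → Bool) (x : α) (l : List α)
    (h : ∀ y ∈ l, before x y = true) :
    PySem.List.insertBy before x l = x :: l := by
  cases l with
  | nil => rfl
  | cons a l => simp [PySem.List.insertBy, h a (by simp)]

lemma insert_pvC (x : List (String × String)) (ys : List (List (String × String))) :
    PySem.List.insertBy (fun a b => decide (pvKeyB a < pvKeyB b)) x (pvC ys) = pvC (ys ++ [x]) := by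
  simp only [pvC]
  rcases pvKeyB_cases x with h|h|h|h|h|h|h|h
  · -- pvKeyB x = 0
    rw [insertBy_skip _ x (pvBkt 0 ys) _ (fun y hy => by rw [h, mem_pvBkt hy]; decide)]
    rw [insertBy_all _ x _ (fun y hy => by
      simp only [List.mem_append] at hy
      rcases hy with hy|hy|hy|hy|hy|hy|hy <;> (rw [h, mem_pvBkt hy]; decide))]
    simp [pvBkt, List.filter_append, h]
  · -- pvKeyB x = 1
    rw [insertBy_skip _ x (pvBkt 0 ys) _ (fun y hy => by rw [h, mem_pvBkt hy]; decide)]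
    rw [insertBy_skip _ x (pvBkt 1 ys) _ (fun y hy => by rw [h, mem_pvBkt hy]; decide)]
    rw [insertBy_all _ x _ (fun y hy => by
      simp only [List.mem_append] at hy
      rcases hy with hy|hy|hy|hy|hy|hy <;> (rw [h, mem_pvBkt hy]; decide))]
    simp [pvBkt, List.filter_append, h]
  · -- pvKeyB x = 2
    rw [insertBy_skip _ x (pvBkt 0 ys) _ (fun y hy => by rw [h, mem_pvBkt hy]; decide)]
    rw [insertBy_skip _ x (pvBkt 1 ys) _ (fun y hy => by rw [h, mem_pvBkt hy]; decide)]
    rw [insertBy_skip _ x (pvBkt 2 ys) _ (fun y hy => by rw [h, mem_pvBkt hy]; decide)]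
    rw [insertBy_all _ x _ (fun y hy => by
      simp only [List.mem_append] at hy
      rcases hy with hy|hy|hy|hy|hy <;> (rw [h, mem_pvBkt hy]; decide))]
    simp [pvBkt, List.filter_append, h]
  · -- pvKeyB x = 3
    rw [insertBy_skip _ x (pvBkt 0 ys) _ (fun y hy => by rw [h, mem_pvBkt hy]; decide)]
    rw [insertBy_skip _ x (pvBkt 1 ys) _ (fun y hy => by rw [h, mem_pvBkt hy]; decide)]
    rw [insertBy_skip _ x (pvBkt 2 ys) _ (fun y hy => by rw [h, mem_pvBkt hy]; decide)]
    rw [insertBy_skip _ x (pvBkt 3 ys) _ (fun y hy => by rw [h, mem_pvBkt hy]; decide)]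
    rw [insertBy_all _ x _ (fun y hy => by
      simp only [List.mem_append] at hy
      rcases hy with hy|hy|hy|hy <;> (rw [h, mem_pvBkt hy]; decide))]
    simp [pvBkt, List.filter_append, h]
  · -- pvKeyB x = 4
    rw [insertBy_skip _ x (pvBkt 0 ys) _ (fun y hy => by rw [h, mem_pvBkt hy]; decide)]
    rw [insertBy_skip _ x (pvBkt 1 ys) _ (fun y hy => by rw [h, mem_pvBkt hy]; decide)]
    rw [insertBy_skip _ x (pvBkt 2 ys) _ (fun y hy => by rw [h, mem_pvBkt hy]; decide)]
    rw [insertBy_skip _ x (pvBkt 3 ys) _ (fun y hy => by rw [h, mem_pvBkt hy]; decide)]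
    rw [insertBy_skip _ x (pvBkt 4 ys) _ (fun y hy => by rw [h, mem_pvBkt hy]; decide)]
    rw [insertBy_all _ x _ (fun y hy => by
      simp only [List.mem_append] at hy
      rcases hy with hy|hy|hy <;> (rw [h, mem_pvBkt hy]; decide))]
    simp [pvBkt, List.filter_append, h]
  · -- pvKeyB x = 5
    rw [insertBy_skip _ x (pvBkt 0 ys) _ (fun y hy => by rw [h, mem_pvBkt hy]; decide)]
    rw [insertBy_skip _ x (pvBkt 1 ys) _ (fun y hy => by rw [h, mem_pvBkt hy]; decide)]
    rw [insertBy_skip _ x (pvBkt 2 ys) _ (fun y hy => by rw [h, mem_pvBkt hy]; decide)]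
    rw [insertBy_skip _ x (pvBkt 3 ys) _ (fun y hy => by rw [h, mem_pvBkt hy]; decide)]
    rw [insertBy_skip _ x (pvBkt 4 ys) _ (fun y hy => by rw [h, mem_pvBkt hy]; decide)]
    rw [insertBy_skip _ x (pvBkt 5 ys) _ (fun y hy => by rw [h, mem_pvBkt hy]; decide)]
    rw [insertBy_all _ x _ (fun y hy => by
      simp only [List.mem_append] at hy
      rcases hy with hy|hy <;> (rw [h, mem_pvBkt hy]; decide))]
    simp [pvBkt, List.filter_append, h]
  · -- pvKeyB x = 6
    rw [insertBy_skip _ x (pvBkt 0 ys) _ (fun y hy => by rw [h, mem_pvBkt hy]; decide)]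
    rw [insertBy_skip _ x (pvBkt 1 ys) _ (fun y hy => by rw [h, mem_pvBkt hy]; decide)]
    rw [insertBy_skip _ x (pvBkt 2 ys) _ (fun y hy => by rw [h, mem_pvBkt hy]; decide)]
    rw [insertBy_skip _ x (pvBkt 3 ys) _ (fun y hy => by rw [h, mem_pvBkt hy]; decide)]
    rw [insertBy_skip _ x (pvBkt 4 ys) _ (fun y hy => by rw [h, mem_pvBkt hy]; decide)]
    rw [insertBy_skip _ x (pvBkt 5 ys) _ (fun y hy => by rw [h, mem_pvBkt hy]; decide)]
    rw [insertBy_skip _ x (pvBkt 6 ys) _ (fun y hy => by rw [h, mem_pvBkt hy]; decide)]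
    rw [insertBy_all _ x _ (fun y hy => by rw [h, mem_pvBkt hy]; decide)]
    simp [pvBkt, List.filter_append, h]
  · -- pvKeyB x = 7
    rw [insertBy_skip _ x (pvBkt 0 ys) _ (fun y hy => by rw [h, mem_pvBkt hy]; decide)]
    rw [insertBy_skip _ x (pvBkt 1 ys) _ (fun y hy => by rw [h, mem_pvBkt hy]; decide)]
    rw [insertBy_skip _ x (pvBkt 2 ys) _ (fun y hy => by rw [h, mem_pvBkt hy]; decide)]
    rw [insertBy_skip _ x (pvBkt 3 ys) _ (fun y hy => by rw [h, mem_pvBkt hy]; decide)]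
    rw [insertBy_skip _ x (pvBkt 4 ys) _ (fun y hy => by rw [h, mem_pvBkt hy]; decide)]
    rw [insertBy_skip _ x (pvBkt 5 ys) _ (fun y hy => by rw [h, mem_pvBkt hy]; decide)]
    rw [insertBy_skip _ x (pvBkt 6 ys) _ (fun y hy => by rw [h, mem_pvBkt hy]; decide)]
    rw [PySem.List.insertBy_of_forall_not_before _ x _ (fun y hy => by rw [h, mem_pvBkt hy]; decide)]
    simp [pvBkt, List.filter_append, h]

lemma foldl_ins (xs : List (List (String × String))) : ∀ ys,
    List.foldl (fun acc x => PySem.List.insertBy (fun a b => decide (pvKeyB a < pvKeyB b)) x acc)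
      (pvC ys) xs = pvC (ys ++ xs) := by
  induction xs with
  | nil => intro ys; simp
  | cons x xs ih =>
    intro ys
    rw [List.foldl_cons, insert_pvC, ih (ys ++ [x])]
    simp

lemma alt_eq_pvC (xs : List (List (String × String))) : ordered_caption_tracks_py_alt xs = pvC xs := by
  have h := foldl_ins xs []
  have h0 : pvC [] = [] := rfl
  rw [h0] at h
  simp only [List.nil_append] at h
  simp only [ordered_caption_tracks_py_alt, PySem.List.sorted_eq_foldl_insertBy]
  exact h

lemma a_eq_pvC (xs : List (List (String × String))) : ordered_caption_tracks_py xs = pvC xs := by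
  simp only [ordered_caption_tracks_py, pvPreferredExts, List.foldl_cons, List.foldl_nil, pvStep]
  simp only [List.filter_filter, List.nil_append, List.append_assoc]
  simp only [pvC, pvBkt]
  refine congrArg₂ (· ++ ·) (List.filter_congr fun t _ => ?_) (congrArg₂ (· ++ ·)
    (List.filter_congr fun t _ => ?_) (congrArg₂ (· ++ ·) (List.filter_congr fun t _ => ?_)
    (congrArg₂ (· ++ ·) (List.filter_congr fun t _ => ?_) (congrArg₂ (· ++ ·)
    (List.filter_congr fun t _ => ?_) (congrArg₂ (· ++ ·) (List.filter_congr fun t _ => ?_)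
    (congrArg₂ (· ++ ·) (List.filter_congr fun t _ => ?_) (List.filter_congr fun t _ => ?_)))))))
  all_goals
    have hK : pvKeyB t = pvPriority.getD ((PySem.Dict.mk t).get? "ext") 7 := rfl
    rw [hK]
    generalize (PySem.Dict.mk t).get? "ext" = o
    rcases o with _ | e
    · decide
    · by_cases h1 : e = "json3"; · subst h1; decide
      by_cases h2 : e = "vtt"; · subst h2; decide
      by_cases h3 : e = "ttml"; · subst h3; decide
      by_cases h4 : e = "srv3"; · subst h4; decide
      by_cases h5 : e = "srv2"; · subst h5; decide
      by_cases h6 : e = "srv1"; · subst h6; decide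
      by_cases h7 : e = "json"; · subst h7; decide
      have g1 : ("json3" == e) = false := beq_eq_false_iff_ne.mpr (Ne.symm h1)
      have g2 : ("vtt" == e) = false := beq_eq_false_iff_ne.mpr (Ne.symm h2)
      have g3 : ("ttml" == e) = false := beq_eq_false_iff_ne.mpr (Ne.symm h3)
      have g4 : ("srv3" == e) = false := beq_eq_false_iff_ne.mpr (Ne.symm h4)
      have g5 : ("srv2" == e) = false := beq_eq_false_iff_ne.mpr (Ne.symm h5)
      have g6 : ("srv1" == e) = false := beq_eq_false_iff_ne.mpr (Ne.symm h6)
      have g7 : ("json" == e) = false := beq_eq_false_iff_ne.mpr (Ne.symm h7)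
      have f1 : (e == "json3") = false := beq_eq_false_iff_ne.mpr h1
      have f2 : (e == "vtt") = false := beq_eq_false_iff_ne.mpr h2
      have f3 : (e == "ttml") = false := beq_eq_false_iff_ne.mpr h3
      have f4 : (e == "srv3") = false := beq_eq_false_iff_ne.mpr h4
      have f5 : (e == "srv2") = false := beq_eq_false_iff_ne.mpr h5
      have f6 : (e == "srv1") = false := beq_eq_false_iff_ne.mpr h6
      have f7 : (e == "json") = false := beq_eq_false_iff_ne.mpr h7
      simp [pvPriority, PySem.Dict.getD, PySem.Dict.get?, List.find?,
            g1, g2, g3, g4, g5, g6, g7, f1, f2, f3, f4, f5, f6, f7]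

-- ===== VERDICT (by name: the statement is the Claim_ definition above) =====
theorem ordered_caption_tracks_py_spec : Claim_equal_ordered_caption_tracks_py := by
  intro tracks _
  unfold Spec_ordered_caption_tracks_py
  rw [a_eq_pvC, alt_eq_pvC]
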